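-- pv_equiv track=rewrite | github.com/sharuk2k3/FS-Elite-2021-22 | Day-33/Day_33_P_2.py | subsequence_string
-- ===== SOURCE A (Python) =====
-- def subsequence_string(s,t):
--     res,j,k = 0,0,-1
--     while True:
--         if j >= len(t):
--             return res
--         if k == j:
--             return -1
--         k = j
--         for i in s:
--             if t[j] == i:
--                 j += 1
--             if j >= len(t):
--                 return res+1
--         res += 1
-- ===== SOURCE B (Python) =====
-- def subsequence_string(s, t):
--     # One pass over t with a moving cursor into s via str.find, wrapping to a new copy when needed.
--     if not t:
--         return 0
--     copies = 1
--     pos = 0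
--     for c in t:
--         i = s.find(c, pos)
--         if i == -1:
--             copies += 1
--             i = s.find(c)
--             if i == -1:
--                 return -1
--             pos = i + 1
--         else:
--             pos = i + 1
--     return copies
-- ===== Notes on version B (the rewrite author's own statement) =====
-- stated objective: faster
-- what changed: A repeatedly scans whole copies of s char-by-char to consume t; B makes a single pass over t, jumping with str.find (with a start offset) to the next occurrence in s and wrapping the cursor to a new copy only when the search fails.
import Mathlib
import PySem

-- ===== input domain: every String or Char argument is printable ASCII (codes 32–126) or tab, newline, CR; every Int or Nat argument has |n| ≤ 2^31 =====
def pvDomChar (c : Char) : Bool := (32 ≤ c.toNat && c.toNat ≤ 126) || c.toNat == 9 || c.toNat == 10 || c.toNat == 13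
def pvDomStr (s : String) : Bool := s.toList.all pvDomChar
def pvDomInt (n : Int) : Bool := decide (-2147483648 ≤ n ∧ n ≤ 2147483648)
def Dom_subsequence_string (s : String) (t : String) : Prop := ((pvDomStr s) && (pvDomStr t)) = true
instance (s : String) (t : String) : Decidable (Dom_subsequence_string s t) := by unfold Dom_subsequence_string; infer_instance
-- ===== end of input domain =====

-- B replaces A's repeated full passes over s by one pass over t with a moving find-cursor into s (return value only; neither version mutates).

-- ===== PORT A =====
-- the 'for i in s' loop: Sum.inl r = an early 'return r' from inside the loop, Sum.inr j = fall through with updated j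
def subseqFor (t : String) : List Char → Int → Int → (Int ⊕ Int)
  | [], _, j => Sum.inr j
  | i :: rest, res, j =>
      let j' := if PySem.Str.pyGet? t j = some i then j + 1 else j
      if PySem.Str.len t ≤ j' then Sum.inl (res + 1)
      else subseqFor t rest res j'

-- the 'while True' loop; fuel t.length+2 is an upper bound on the number of iterations (each
-- iteration returns, or advances j, or is followed by an iteration that returns -1), so the
-- fuel-exhaustion branch is unreachable — it only makes the recursion structural.
def subseqLoop (s t : String) : Nat → Int → Int → Int → Int
  | 0, _, _, _ => 0
  | fuel + 1, res, j, k =>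
      if PySem.Str.len t ≤ j then res
      else if k = j then -1
      else
        match subseqFor t s.toList res j with
        | Sum.inl r => r
        | Sum.inr j' => subseqLoop s t fuel (res + 1) j' j

def subsequence_string (s : String) (t : String) : Int :=
  subseqLoop s t (t.toList.length + 2) 0 0 (-1)

-- ===== PORT B =====
-- the 'for c in t' loop of Source B, state (copies, pos)
def subseqAltLoop (s : String) : List Char → Int → Int → Int
  | [], copies, _ => copies
  | c :: tt, copies, pos =>
      let i := PySem.Str.findFrom s (String.singleton c) pos none
      if i = -1 then
        let copies' := copies + 1
        let i2 := PySem.Str.find s (String.singleton c)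
        if i2 = -1 then -1
        else subseqAltLoop s tt copies' (i2 + 1)
      else subseqAltLoop s tt copies (i + 1)

def subsequence_string_alt (s : String) (t : String) : Int :=
  if t = "" then 0 else subseqAltLoop s t.toList 1 0

-- ===== PRECONDITION & SPEC =====
def Spec_subsequence_string (s : String) (t : String) (out : Int) : Prop := out = subsequence_string_alt s t
instance (s : String) (t : String) (out : Int) : Decidable (Spec_subsequence_string s t out) := by unfold Spec_subsequence_string; infer_instance

-- ===== CLAIM (what is proved, stated in full; the proofs are below) =====
def Claim_equal_subsequence_string : Prop := ∀ (s : String) (t : String), Dom_subsequence_string s t → Spec_subsequence_string s t (subsequence_string s t)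

-- ===== LEMMAS AND PROOFS =====

-- the list after the first occurrence of c (if any)
def afterFirst (c : Char) : List Char → List Char
  | [] => []
  | x :: rest => if x = c then rest else afterFirst c rest

-- one greedy pass of A: scan ss once, consuming matchable front chars of tt
def matchPass : List Char → List Char → List Char
  | [], tt => tt
  | _ :: _, [] => []
  | i :: ss, c :: tt => if c = i then matchPass ss tt else matchPass ss (c :: tt)

-- common reference: consume tt, ss = unread rest of the current copy of s
def specGo (s : List Char) : List Char → List Char → Int → Int
  | [], _, copies => copies
  | c :: tt, ss, copies =>
      if c ∈ ss then specGo s tt (afterFirst c ss) copies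
      else if c ∈ s then specGo s tt (afterFirst c s) (copies + 1)
      else -1

theorem matchPass_nil_right (ss : List Char) : matchPass ss [] = [] := by
  cases ss <;> rfl

theorem matchPass_step (ss : List Char) (c : Char) (tt : List Char) :
    matchPass ss (c :: tt) = if c ∈ ss then matchPass (afterFirst c ss) tt else c :: tt := by
  induction ss with
  | nil => simp [matchPass]
  | cons i ss ih =>
    by_cases h : c = i
    · subst h
      simp [matchPass, afterFirst]
    · have hne : i ≠ c := fun h' => h h'.symm
      simp [matchPass, afterFirst, h, hne, ih]

theorem matchPass_suffix (ss tt : List Char) : matchPass ss tt <:+ tt := by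
  induction ss generalizing tt with
  | nil => simp [matchPass]
  | cons i ss ih =>
    cases tt with
    | nil => simp [matchPass]
    | cons c tt =>
      by_cases h : c = i
      · simpa [matchPass, h] using (ih tt).trans (List.suffix_cons _ _)
      · simpa [matchPass, h] using ih (c :: tt)

theorem matchPass_length (ss tt : List Char) : (matchPass ss tt).length ≤ tt.length :=
  (matchPass_suffix ss tt).length_le

theorem specGo_pass (s : List Char) (tt ss : List Char) (copies : Int) :
    specGo s tt ss copies = specGo s (matchPass ss tt) [] copies := by
  induction tt generalizing ss copies with
  | nil => simp [matchPass_nil_right, specGo]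
  | cons c tt ih =>
    rw [matchPass_step]
    by_cases h : c ∈ ss
    · simp only [specGo, if_pos h]
      exact ih _ _
    · simp only [specGo, if_neg h]
      by_cases hs : c ∈ s
      · simp [hs]
      · simp [hs]

theorem strLen_eq (t : String) : PySem.Str.len t = (t.toList.length : Int) := by
  simp [PySem.Str.len_eq]

theorem subseqFor_eq (t : String) (sl : List Char) (res : Int) (jn : Nat)
    (hj : jn < t.toList.length) :
    subseqFor t sl res (jn : Int) =
      if matchPass sl (t.toList.drop jn) = [] then Sum.inl (res + 1)
      else Sum.inr ((t.toList.length : Int) - (matchPass sl (t.toList.drop jn)).length) := by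
  have hrfl : t.length = t.toList.length := rfl
  induction sl generalizing jn with
  | nil =>
    have hlen : (t.toList.drop jn).length = t.toList.length - jn := List.length_drop ..
    have hne : t.toList.drop jn ≠ [] := by
      intro h; rw [h] at hlen; simp at hlen; omega
    simp only [subseqFor, matchPass, if_neg hne]
    congr 1
    rw [hlen]
    omega
  | cons i sl ih =>
    have hdrop : t.toList.drop jn = t.toList[jn] :: t.toList.drop (jn + 1) :=
      List.drop_eq_getElem_cons hj
    have hget : PySem.Str.pyGet? t (jn : Int) = some t.toList[jn] := by
      simp [List.getElem?_eq_getElem hj]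
    rw [hdrop]
    by_cases hc : t.toList[jn] = i
    · -- matching char: j increments
      simp only [subseqFor, hget, Option.some.injEq, matchPass, if_pos hc]
      by_cases hend : jn + 1 = t.toList.length
      · have hnil : t.toList.drop (jn + 1) = [] := by rw [hend]; simp
        have hcond : PySem.Str.len t ≤ (jn : Int) + 1 := by rw [strLen_eq]; omega
        rw [if_pos hcond, hnil, matchPass_nil_right]
        simp
      · have hlt : jn + 1 < t.toList.length := by omega
        have hcond : ¬ PySem.Str.len t ≤ (jn : Int) + 1 := by rw [strLen_eq]; omega
        have hcast : (jn : Int) + 1 = ((jn + 1 : Nat) : Int) := by push_cast; ring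
        rw [if_neg hcond, hcast, ih (jn + 1) hlt]
    · -- non-matching char
      have hci : ¬ (some t.toList[jn] = some i) := by simpa using hc
      have hcond : ¬ PySem.Str.len t ≤ (jn : Int) := by rw [strLen_eq]; omega
      simp only [subseqFor, hget, if_neg hci, matchPass, if_neg hc]
      rw [if_neg hcond, ih jn hj, hdrop]

theorem suffix_eq_drop {α : Type} (l t : List α) (h : l <:+ t) :
    l = t.drop (t.length - l.length) := by
  obtain ⟨pre, rfl⟩ := h
  simp [List.drop_left']

theorem subseqLoop_eq (s t : String) (fuel : Nat) (res : Int) (jn : Nat) (k : Int)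
    (hj : jn ≤ t.toList.length) (hk : k ≠ (jn : Int)) (hf : t.toList.length - jn < fuel) :
    subseqLoop s t fuel res jn k =
      if t.toList.drop jn = [] then res
      else specGo s.toList (t.toList.drop jn) s.toList (res + 1) := by
  induction fuel generalizing res jn k with
  | zero => omega
  | succ fuel ih =>
    by_cases hend : t.toList.length ≤ jn
    · have hnil : t.toList.drop jn = [] := by
        have hjn : jn = t.toList.length := le_antisymm hj hend
        rw [hjn]; simp
      have hcond : PySem.Str.len t ≤ (jn : Int) := by rw [strLen_eq]; exact_mod_cast hend
      rw [hnil]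
      simp only [subseqLoop, if_pos hcond]
      simp
    · have hlt : jn < t.toList.length := by omega
      have hcond : ¬ PySem.Str.len t ≤ (jn : Int) := by
        rw [strLen_eq]; exact_mod_cast Nat.not_le.mpr hlt
      have hne : t.toList.drop jn ≠ [] := by
        intro h
        have := List.length_drop (l := t.toList) (i := jn)
        rw [h] at this; simp only [List.length_nil] at this; omega
      rw [if_neg hne]
      simp only [subseqLoop, if_neg hcond, if_neg hk]
      rw [subseqFor_eq t s.toList res jn hlt]
      set tt := t.toList.drop jn with htt
      set tt' := matchPass s.toList tt with htt'
      have httlen : tt.length = t.toList.length - jn := List.length_drop ..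
      by_cases hdone : tt' = []
      · rw [if_pos hdone]
        rw [specGo_pass, ← htt', hdone]
        rfl
      · rw [if_neg hdone]
        have hsuf : tt' <:+ t.toList := (matchPass_suffix s.toList tt).trans (List.drop_suffix _ _)
        have hlen' : tt'.length ≤ tt.length := matchPass_length s.toList tt
        have hlen'' : tt'.length ≤ t.toList.length := by omega
        have hdropeq : tt' = t.toList.drop (t.toList.length - tt'.length) :=
          suffix_eq_drop _ _ hsuf
        have hcast : (t.toList.length : Int) - (tt'.length : Int)
            = ((t.toList.length - tt'.length : Nat) : Int) := by omega
        rw [hcast]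
        set j'n := t.toList.length - tt'.length with hj'n
        change subseqLoop s t fuel (res + 1) (j'n : Int) ((jn : Nat) : Int) = _
        by_cases hprog : tt'.length = tt.length
        · -- no progress in this pass: the next iteration returns -1
          have hjj : j'n = jn := by omega
          have htteq : tt' = tt := (matchPass_suffix s.toList tt).eq_of_length (by omega)
          rw [hjj]
          cases fuel with
          | zero => omega
          | succ fuel =>
            simp only [subseqLoop, if_neg hcond]
            rw [specGo_pass s.toList tt s.toList (res + 1), ← htt', htteq]
            obtain ⟨c, tt1, hconsq⟩ := List.exists_cons_of_ne_nil hne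
            have hmp : matchPass s.toList (c :: tt1) = c :: tt1 := by
              rw [← hconsq, ← htt', htteq]
            have hcs : c ∉ s.toList := by
              intro hcmem
              have hstep := matchPass_step s.toList c tt1
              rw [hmp, if_pos hcmem] at hstep
              have hlen3 := matchPass_length (afterFirst c s.toList) tt1
              have hlen4 := congrArg List.length hstep
              simp only [List.length_cons] at hlen4
              omega
            rw [hconsq]
            simp [specGo, hcs]
        · -- progress: j advanced strictly, recurse
          have hlt2 : tt'.length < tt.length := lt_of_le_of_ne hlen' hprog
          have hne2 : ((jn : Nat) : Int) ≠ (j'n : Int) := by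
            intro h
            have : jn = j'n := by exact_mod_cast h
            omega
          rw [ih (res + 1) j'n (jn : Int) (by omega) hne2 (by omega)]
          rw [← hdropeq, if_neg hdone]
          rw [specGo_pass s.toList tt s.toList (res + 1), ← htt']
          obtain ⟨c, tt1, hconsq⟩ := List.exists_cons_of_ne_nil hdone
          rw [hconsq]
          by_cases hcs : c ∈ s.toList
          · simp [specGo, hcs]
          · simp [specGo, hcs]

-- singleton substring facts
theorem singleton_infix_iff (c : Char) (l : List Char) : [c] <:+: l ↔ c ∈ l := by
  constructor
  · intro h
    exact h.subset (by simp)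
  · intro h
    obtain ⟨l1, l2, rfl⟩ := List.append_of_mem h
    exact ⟨l1, l2, by simp⟩

theorem singleton_prefix_iff (c : Char) (l : List Char) : [c] <+: l ↔ ∃ l', l = c :: l' := by
  cases l with
  | nil => simp
  | cons x xs =>
    constructor
    · intro h
      rw [List.cons_prefix_cons] at h
      exact ⟨xs, by rw [h.1]⟩
    · rintro ⟨l', h⟩
      cases h
      simp

theorem afterFirst_eq_drop (c : Char) (l : List Char) (d : Nat)
    (hmin : ∀ i < d, ¬ [c] <+: l.drop i) (hd : [c] <+: l.drop d) :
    afterFirst c l = l.drop (d + 1) := by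
  induction l generalizing d with
  | nil =>
    simp only [List.drop_nil] at hd
    exact absurd hd (by simp)
  | cons x xs ih =>
    cases d with
    | zero =>
      simp only [List.drop_zero] at hd
      obtain ⟨l', hl⟩ := (singleton_prefix_iff c _).mp hd
      cases hl
      simp [afterFirst]
    | succ d =>
      have hx : ¬ [c] <+: (x :: xs) := by simpa using hmin 0 (Nat.succ_pos d)
      have hxc : x ≠ c := by
        intro h; cases h
        exact hx (List.prefix_iff_eq_take.mpr (by simp))
      have h1 : afterFirst c (x :: xs) = afterFirst c xs := by simp [afterFirst, hxc]
      rw [h1, List.drop_succ_cons]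
      exact ih d (fun i hi => by simpa using hmin (i + 1) (by omega)) (by simpa using hd)

theorem mem_of_prefix_drop (c : Char) (l : List Char) (d : Nat) (hd : [c] <+: l.drop d) :
    c ∈ l := by
  have : c ∈ l.drop d := hd.subset (by simp)
  exact List.mem_of_mem_drop this

theorem not_mem_of_find_neg (c : Char) (l : List Char)
    (h : PySem.Chars.find l [c] = -1) : c ∉ l := by
  rw [PySem.Chars.find_eq_neg_one_iff, singleton_infix_iff] at h
  exact h

theorem find_pos_facts (c : Char) (l : List Char) (h : PySem.Chars.find l [c] ≠ -1) :
    0 ≤ PySem.Chars.find l [c] ∧ (PySem.Chars.find l [c]).toNat < l.length ∧ c ∈ l ∧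
      afterFirst c l = l.drop ((PySem.Chars.find l [c]).toNat + 1) := by
  have hge : 0 ≤ PySem.Chars.find l [c] := by
    have := PySem.Chars.neg_one_le_find (s := l) (sub := [c])
    omega
  obtain ⟨hpre, hmin⟩ := PySem.Chars.find_spec (s := l) (sub := [c]) hge
  have hmem : c ∈ l := mem_of_prefix_drop c l _ hpre
  refine ⟨hge, ?_, hmem, afterFirst_eq_drop c l _ hmin hpre⟩
  -- the index points at an occurrence, hence is < length
  obtain ⟨l', hl⟩ := (singleton_prefix_iff c _).mp hpre
  by_contra hbig
  have : l.drop (PySem.Chars.find l [c]).toNat = [] := List.drop_eq_nil_of_le (by omega)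
  rw [this] at hl
  exact absurd hl (by simp)

theorem subseqAltLoop_eq (s : String) (tt : List Char) (copies : Int) (p : Nat)
    (hp : p ≤ s.toList.length) :
    subseqAltLoop s tt copies (p : Int) = specGo s.toList tt (s.toList.drop p) copies := by
  induction tt generalizing copies p with
  | nil => rfl
  | cons c tt ih =>
    have hsl : (String.singleton c).toList = [c] := by simp
    have hfindFrom : PySem.Str.findFrom s (String.singleton c) (p : Int) none =
        (if PySem.Chars.find (s.toList.drop p) [c] = -1 then -1
         else (p : Int) + PySem.Chars.find (s.toList.drop p) [c]) := by
      rw [PySem.Str.findFrom_eq, hsl]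
      exact PySem.Chars.findFrom_natCast s.toList [c] p hp
    simp only [subseqAltLoop, hfindFrom]
    by_cases hloc : PySem.Chars.find (s.toList.drop p) [c] = -1
    · -- not found from pos: wrap to a fresh copy
      have hnotmem : c ∉ s.toList.drop p := not_mem_of_find_neg c _ hloc
      rw [if_pos hloc, if_pos rfl]
      have hfind : PySem.Str.find s (String.singleton c) = PySem.Chars.find s.toList [c] := by
        rw [PySem.Str.find_eq, hsl]
      by_cases hglob : PySem.Chars.find s.toList [c] = -1
      · have : c ∉ s.toList := not_mem_of_find_neg c _ hglob
        rw [if_pos (by rw [hfind]; exact hglob)]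
        simp [specGo, hnotmem, this]
      · obtain ⟨hge, hlen, hmem, haf⟩ := find_pos_facts c s.toList hglob
        rw [if_neg (by rw [hfind]; exact hglob)]
        have hcast : PySem.Str.find s (String.singleton c) + 1
            = (((PySem.Chars.find s.toList [c]).toNat + 1 : Nat) : Int) := by
          rw [hfind]; omega
        rw [hcast, ih (copies + 1) _ (by omega)]
        simp only [specGo, if_neg (by exact hnotmem : ¬ c ∈ s.toList.drop p), if_pos hmem, haf]
    · -- found at p + find
      have hge2 : 0 ≤ PySem.Chars.find (s.toList.drop p) [c] := by
        have := PySem.Chars.neg_one_le_find (s := s.toList.drop p) (sub := [c])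
        omega
      obtain ⟨hge, hlen, hmem, haf⟩ := find_pos_facts c (s.toList.drop p) hloc
      rw [if_neg hloc, if_neg (by omega)]
      have hcast : (p : Int) + PySem.Chars.find (s.toList.drop p) [c] + 1
          = ((p + (PySem.Chars.find (s.toList.drop p) [c]).toNat + 1 : Nat) : Int) := by omega
      have hdd : s.toList.drop (p + (PySem.Chars.find (s.toList.drop p) [c]).toNat + 1)
          = (s.toList.drop p).drop ((PySem.Chars.find (s.toList.drop p) [c]).toNat + 1) := by
        rw [List.drop_drop]; ring_nf
      have hplen : p + (PySem.Chars.find (s.toList.drop p) [c]).toNat + 1 ≤ s.toList.length := by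
        have := List.length_drop (l := s.toList) (i := p)
        omega
      rw [hcast, ih copies _ hplen]
      simp only [specGo, if_pos hmem, haf, hdd]

-- ===== VERDICT (by name: the statement is the Claim_ definition above) =====
theorem subsequence_string_spec : Claim_equal_subsequence_string := by
  intro s t _
  unfold Spec_subsequence_string subsequence_string subsequence_string_alt
  have hA := subseqLoop_eq s t (t.toList.length + 2) 0 0 (-1)
    (Nat.zero_le _) (by decide) (by omega)
  simp only [Nat.cast_zero] at hA
  rw [hA, List.drop_zero]
  by_cases hnil : t = ""
  · have : t.toList = [] := by rw [hnil]; rfl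
    rw [if_pos this, if_pos hnil]
  · have hlne : t.toList ≠ [] := by
      intro h
      exact hnil (by rw [← String.ofList_toList (s := t), h])
    rw [if_neg hlne, if_neg hnil]
    have hB := subseqAltLoop_eq s t.toList 1 0 (Nat.zero_le _)
    simp only [Nat.cast_zero, List.drop_zero] at hB
    rw [hB]
    norm_num
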